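-- pv_equiv track=rewrite | github.com/rysweet/azlin | extract_commands.py | categorize_commands
-- ===== SOURCE A (Python) =====
-- def categorize_commands(commands: list[tuple[str, int, int]]) -> dict:
--     """Categorize commands into logical groups."""
--
--     monitoring = ["list", "status", "session", "w", "top", "ps"]
--     lifecycle = ["start", "stop", "kill", "destroy", "killall", "clone"]
--     connectivity = ["connect", "code", "cp", "sync"]
--     admin = ["prune", "update", "os-update", "cost"]
--     provisioning = ["new", "vm", "create"]
--     special = ["do", "help"]
--
--     categories = {
--         "monitoring": [],
--         "lifecycle": [],
--         "connectivity": [],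
--         "admin": [],
--         "provisioning": [],
--         "special": [],
--         "uncategorized": [],
--     }
--
--     for cmd_info in commands:
--         cmd_name = cmd_info[0]
--
--         if cmd_name in monitoring:
--             categories["monitoring"].append(cmd_info)
--         elif cmd_name in lifecycle:
--             categories["lifecycle"].append(cmd_info)
--         elif cmd_name in connectivity:
--             categories["connectivity"].append(cmd_info)
--         elif cmd_name in admin:
--             categories["admin"].append(cmd_info)
--         elif cmd_name in provisioning:
--             categories["provisioning"].append(cmd_info)
--         elif cmd_name in special:
--             categories["special"].append(cmd_info)
--         else:
--             categories["uncategorized"].append(cmd_info)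
--
--     return categories
-- ===== SOURCE B (Python) =====
-- _LOOKUP = {
--     "list": "monitoring", "status": "monitoring", "session": "monitoring",
--     "w": "monitoring", "top": "monitoring", "ps": "monitoring",
--     "start": "lifecycle", "stop": "lifecycle", "kill": "lifecycle",
--     "destroy": "lifecycle", "killall": "lifecycle", "clone": "lifecycle",
--     "connect": "connectivity", "code": "connectivity", "cp": "connectivity",
--     "sync": "connectivity",
--     "prune": "admin", "update": "admin", "os-update": "admin", "cost": "admin",
--     "new": "provisioning", "vm": "provisioning", "create": "provisioning",
--     "do": "special", "help": "special",
-- }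
--
-- _CATEGORY_NAMES = ("monitoring", "lifecycle", "connectivity", "admin",
--                    "provisioning", "special", "uncategorized")
--
--
-- def categorize_commands(commands: list[tuple[str, int, int]]) -> dict:
--     """Categorize commands into logical groups."""
--     return {
--         cat: [ci for ci in commands
--               if _LOOKUP.get(ci[0], "uncategorized") == cat]
--         for cat in _CATEGORY_NAMES
--     }
-- ===== Notes on version B (the rewrite author's own statement) =====
-- stated objective: idiomatic
-- what changed: Replaces the six-way if/elif membership chain plus in-place appends by a precomputed name->category lookup table and a dict comprehension that builds each of the seven category lists as a filter of the input (table-driven, no mutation).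
import Mathlib
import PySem

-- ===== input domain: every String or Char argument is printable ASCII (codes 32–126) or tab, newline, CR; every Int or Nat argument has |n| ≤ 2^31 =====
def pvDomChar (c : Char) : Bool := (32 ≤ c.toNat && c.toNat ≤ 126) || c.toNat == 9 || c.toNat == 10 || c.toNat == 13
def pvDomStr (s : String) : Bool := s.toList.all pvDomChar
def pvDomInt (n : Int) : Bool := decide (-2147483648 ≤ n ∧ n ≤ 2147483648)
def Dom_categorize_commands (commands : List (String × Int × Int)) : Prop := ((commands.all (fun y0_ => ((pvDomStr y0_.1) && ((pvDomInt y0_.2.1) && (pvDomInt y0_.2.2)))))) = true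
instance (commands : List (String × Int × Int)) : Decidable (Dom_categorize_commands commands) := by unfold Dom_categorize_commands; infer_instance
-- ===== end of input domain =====

-- B replaces A's six-way if/elif membership chain and in-place appends by a
-- precomputed name→category lookup table and a per-category filter of the input
-- (table-driven, no mutation); objective: idiomatic, same return value.

-- ===== PORT A =====
def monitoringA : List String := ["list", "status", "session", "w", "top", "ps"]
def lifecycleA : List String := ["start", "stop", "kill", "destroy", "killall", "clone"]
def connectivityA : List String := ["connect", "code", "cp", "sync"]
def adminA : List String := ["prune", "update", "os-update", "cost"]
def provisioningA : List String := ["new", "vm", "create"]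
def specialA : List String := ["do", "help"]

def initCatsA : PySem.Dict String (List (String × Int × Int)) :=
  PySem.Dict.ofList
    [("monitoring", []), ("lifecycle", []), ("connectivity", []), ("admin", []),
     ("provisioning", []), ("special", []), ("uncategorized", [])]

-- loop body: the if/elif chain, each branch appending cmd_info to its category list
def stepA (d : PySem.Dict String (List (String × Int × Int))) (cmd_info : String × Int × Int) :
    PySem.Dict String (List (String × Int × Int)) :=
  let cmd_name := cmd_info.1
  if monitoringA.contains cmd_name then d.modify "monitoring" [] (· ++ [cmd_info])
  else if lifecycleA.contains cmd_name then d.modify "lifecycle" [] (· ++ [cmd_info])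
  else if connectivityA.contains cmd_name then d.modify "connectivity" [] (· ++ [cmd_info])
  else if adminA.contains cmd_name then d.modify "admin" [] (· ++ [cmd_info])
  else if provisioningA.contains cmd_name then d.modify "provisioning" [] (· ++ [cmd_info])
  else if specialA.contains cmd_name then d.modify "special" [] (· ++ [cmd_info])
  else d.modify "uncategorized" [] (· ++ [cmd_info])

def categorize_commands (commands : List (String × Int × Int)) : List (String × List (String × Int × Int)) :=
  (commands.foldl stepA initCatsA).items

-- ===== PORT B =====
def lookupB : PySem.Dict String String :=
  PySem.Dict.ofList
    [("list", "monitoring"), ("status", "monitoring"), ("session", "monitoring"),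
     ("w", "monitoring"), ("top", "monitoring"), ("ps", "monitoring"),
     ("start", "lifecycle"), ("stop", "lifecycle"), ("kill", "lifecycle"),
     ("destroy", "lifecycle"), ("killall", "lifecycle"), ("clone", "lifecycle"),
     ("connect", "connectivity"), ("code", "connectivity"), ("cp", "connectivity"),
     ("sync", "connectivity"),
     ("prune", "admin"), ("update", "admin"), ("os-update", "admin"), ("cost", "admin"),
     ("new", "provisioning"), ("vm", "provisioning"), ("create", "provisioning"),
     ("do", "special"), ("help", "special")]

def categoryNamesB : List String :=
  ["monitoring", "lifecycle", "connectivity", "admin", "provisioning", "special", "uncategorized"]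

def categorize_commands_alt (commands : List (String × Int × Int)) : List (String × List (String × Int × Int)) :=
  categoryNamesB.map (fun cat =>
    (cat, commands.filter (fun ci => PySem.Dict.getD lookupB ci.1 "uncategorized" == cat)))

-- ===== PRECONDITION & SPEC =====
def Spec_categorize_commands (commands : List (String × Int × Int)) (out : List (String × List (String × Int × Int))) : Prop := out = categorize_commands_alt commands
instance (commands : List (String × Int × Int)) (out : List (String × List (String × Int × Int))) : Decidable (Spec_categorize_commands commands out) := by unfold Spec_categorize_commands; infer_instance

-- ===== CLAIM (what is proved, stated in full; the proofs are below) =====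
def Claim_equal_categorize_commands : Prop := ∀ (commands : List (String × Int × Int)), Dom_categorize_commands commands → Spec_categorize_commands commands (categorize_commands commands)

-- ===== LEMMAS AND PROOFS =====

-- the category A's if/elif chain assigns to a command name
def fcat (s : String) : String :=
  if monitoringA.contains s then "monitoring"
  else if lifecycleA.contains s then "lifecycle"
  else if connectivityA.contains s then "connectivity"
  else if adminA.contains s then "admin"
  else if provisioningA.contains s then "provisioning"
  else if specialA.contains s then "special"
  else "uncategorized"

-- B's table lookup agrees with A's chain
lemma lookup_eq_fcat (s : String) : PySem.Dict.getD lookupB s "uncategorized" = fcat s := by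
  have hitems : lookupB.items = ([("list", "monitoring"), ("status", "monitoring"), ("session", "monitoring"),
          ("w", "monitoring"), ("top", "monitoring"), ("ps", "monitoring"),
          ("start", "lifecycle"), ("stop", "lifecycle"), ("kill", "lifecycle"),
          ("destroy", "lifecycle"), ("killall", "lifecycle"), ("clone", "lifecycle"),
          ("connect", "connectivity"), ("code", "connectivity"), ("cp", "connectivity"),
          ("sync", "connectivity"),
          ("prune", "admin"), ("update", "admin"), ("os-update", "admin"), ("cost", "admin"),
          ("new", "provisioning"), ("vm", "provisioning"), ("create", "provisioning"),
          ("do", "special"), ("help", "special")] : List (String × String)) := rfl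
  simp only [PySem.Dict.getD, PySem.Dict.get?, hitems, fcat, List.contains]
  split_ifs with h1 h2 h3 h4 h5 h6
  · simp only [monitoringA, List.elem_iff, List.mem_cons, List.not_mem_nil, or_false] at h1
    rcases h1 with rfl | rfl | rfl | rfl | rfl | rfl <;> rfl
  · simp only [lifecycleA, List.elem_iff, List.mem_cons, List.not_mem_nil, or_false] at h2
    rcases h2 with rfl | rfl | rfl | rfl | rfl | rfl <;> rfl
  · simp only [connectivityA, List.elem_iff, List.mem_cons, List.not_mem_nil, or_false] at h3
    rcases h3 with rfl | rfl | rfl | rfl <;> rfl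
  · simp only [adminA, List.elem_iff, List.mem_cons, List.not_mem_nil, or_false] at h4
    rcases h4 with rfl | rfl | rfl | rfl <;> rfl
  · simp only [provisioningA, List.elem_iff, List.mem_cons, List.not_mem_nil, or_false] at h5
    rcases h5 with rfl | rfl | rfl <;> rfl
  · simp only [specialA, List.elem_iff, List.mem_cons, List.not_mem_nil, or_false] at h6
    rcases h6 with rfl | rfl <;> rfl
  · simp only [monitoringA] at h1
    simp only [lifecycleA] at h2
    simp only [connectivityA] at h3
    simp only [adminA] at h4
    simp only [provisioningA] at h5
    simp only [specialA] at h6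
    have hnone : List.find? (fun p => p.1 == s)
        ([("list", "monitoring"), ("status", "monitoring"), ("session", "monitoring"),
          ("w", "monitoring"), ("top", "monitoring"), ("ps", "monitoring"),
          ("start", "lifecycle"), ("stop", "lifecycle"), ("kill", "lifecycle"),
          ("destroy", "lifecycle"), ("killall", "lifecycle"), ("clone", "lifecycle"),
          ("connect", "connectivity"), ("code", "connectivity"), ("cp", "connectivity"),
          ("sync", "connectivity"),
          ("prune", "admin"), ("update", "admin"), ("os-update", "admin"), ("cost", "admin"),
          ("new", "provisioning"), ("vm", "provisioning"), ("create", "provisioning"),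
          ("do", "special"), ("help", "special")] : List (String × String)) = none := by
      refine List.find?_eq_none.mpr ?_
      intro x hx
      fin_cases hx <;> simp only [beq_iff_eq] <;> rintro rfl <;>
        first
        | exact h1 rfl | exact h2 rfl | exact h3 rfl
        | exact h4 rfl | exact h5 rfl | exact h6 rfl
    rw [hnone]
    rfl

-- A's loop body rewritten through fcat
lemma stepA_eq (d : PySem.Dict String (List (String × Int × Int))) (x : String × Int × Int) :
    stepA d x = d.modify (fcat x.1) [] (· ++ [x]) := by
  simp only [stepA, fcat]
  split_ifs <;> rfl

-- the chain always lands in one of the seven category names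
lemma fcat_cases (s : String) :
    fcat s = "monitoring" ∨ fcat s = "lifecycle" ∨ fcat s = "connectivity" ∨ fcat s = "admin" ∨
    fcat s = "provisioning" ∨ fcat s = "special" ∨ fcat s = "uncategorized" := by
  unfold fcat
  split_ifs <;> simp

lemma fold_items (cmds : List (String × Int × Int))
    (m l c a p s u : List (String × Int × Int)) :
    (cmds.foldl stepA (PySem.Dict.mk
      [("monitoring", m), ("lifecycle", l), ("connectivity", c), ("admin", a), ("provisioning", p), ("special", s), ("uncategorized", u)])).items
    = [("monitoring", m ++ cmds.filter (fun x => fcat x.1 == "monitoring")),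
       ("lifecycle", l ++ cmds.filter (fun x => fcat x.1 == "lifecycle")),
       ("connectivity", c ++ cmds.filter (fun x => fcat x.1 == "connectivity")),
       ("admin", a ++ cmds.filter (fun x => fcat x.1 == "admin")),
       ("provisioning", p ++ cmds.filter (fun x => fcat x.1 == "provisioning")),
       ("special", s ++ cmds.filter (fun x => fcat x.1 == "special")),
       ("uncategorized", u ++ cmds.filter (fun x => fcat x.1 == "uncategorized"))] := by
  induction cmds generalizing m l c a p s u with
  | nil => simp
  | cons x xs ih =>
    rw [List.foldl_cons, stepA_eq]
    rcases fcat_cases x.1 with hf | hf | hf | hf | hf | hf | hf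
    · rw [hf, show (PySem.Dict.mk [("monitoring", m), ("lifecycle", l), ("connectivity", c), ("admin", a), ("provisioning", p), ("special", s), ("uncategorized", u)]).modify "monitoring" [] (· ++ [x])
          = PySem.Dict.mk [("monitoring", m ++ [x]), ("lifecycle", l), ("connectivity", c), ("admin", a), ("provisioning", p), ("special", s), ("uncategorized", u)] from rfl, ih]
      simp [hf, List.append_assoc]
    · rw [hf, show (PySem.Dict.mk [("monitoring", m), ("lifecycle", l), ("connectivity", c), ("admin", a), ("provisioning", p), ("special", s), ("uncategorized", u)]).modify "lifecycle" [] (· ++ [x])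
          = PySem.Dict.mk [("monitoring", m), ("lifecycle", l ++ [x]), ("connectivity", c), ("admin", a), ("provisioning", p), ("special", s), ("uncategorized", u)] from rfl, ih]
      simp [hf, List.append_assoc]
    · rw [hf, show (PySem.Dict.mk [("monitoring", m), ("lifecycle", l), ("connectivity", c), ("admin", a), ("provisioning", p), ("special", s), ("uncategorized", u)]).modify "connectivity" [] (· ++ [x])
          = PySem.Dict.mk [("monitoring", m), ("lifecycle", l), ("connectivity", c ++ [x]), ("admin", a), ("provisioning", p), ("special", s), ("uncategorized", u)] from rfl, ih]
      simp [hf, List.append_assoc]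
    · rw [hf, show (PySem.Dict.mk [("monitoring", m), ("lifecycle", l), ("connectivity", c), ("admin", a), ("provisioning", p), ("special", s), ("uncategorized", u)]).modify "admin" [] (· ++ [x])
          = PySem.Dict.mk [("monitoring", m), ("lifecycle", l), ("connectivity", c), ("admin", a ++ [x]), ("provisioning", p), ("special", s), ("uncategorized", u)] from rfl, ih]
      simp [hf, List.append_assoc]
    · rw [hf, show (PySem.Dict.mk [("monitoring", m), ("lifecycle", l), ("connectivity", c), ("admin", a), ("provisioning", p), ("special", s), ("uncategorized", u)]).modify "provisioning" [] (· ++ [x])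
          = PySem.Dict.mk [("monitoring", m), ("lifecycle", l), ("connectivity", c), ("admin", a), ("provisioning", p ++ [x]), ("special", s), ("uncategorized", u)] from rfl, ih]
      simp [hf, List.append_assoc]
    · rw [hf, show (PySem.Dict.mk [("monitoring", m), ("lifecycle", l), ("connectivity", c), ("admin", a), ("provisioning", p), ("special", s), ("uncategorized", u)]).modify "special" [] (· ++ [x])
          = PySem.Dict.mk [("monitoring", m), ("lifecycle", l), ("connectivity", c), ("admin", a), ("provisioning", p), ("special", s ++ [x]), ("uncategorized", u)] from rfl, ih]
      simp [hf, List.append_assoc]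
    · rw [hf, show (PySem.Dict.mk [("monitoring", m), ("lifecycle", l), ("connectivity", c), ("admin", a), ("provisioning", p), ("special", s), ("uncategorized", u)]).modify "uncategorized" [] (· ++ [x])
          = PySem.Dict.mk [("monitoring", m), ("lifecycle", l), ("connectivity", c), ("admin", a), ("provisioning", p), ("special", s), ("uncategorized", u ++ [x])] from rfl, ih]
      simp [hf, List.append_assoc]

lemma initCatsA_mk : initCatsA = PySem.Dict.mk
    [("monitoring", []), ("lifecycle", []), ("connectivity", []), ("admin", []),
     ("provisioning", []), ("special", []), ("uncategorized", [])] := rfl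

-- ===== VERDICT (by name: the statement is the Claim_ definition above) =====
theorem categorize_commands_spec : Claim_equal_categorize_commands := by
  intro commands _
  unfold Spec_categorize_commands categorize_commands
  rw [initCatsA_mk, fold_items]
  have hfun : ∀ cat : String,
      (fun ci : String × Int × Int => (PySem.Dict.getD lookupB ci.1 "uncategorized" == cat))
      = (fun ci : String × Int × Int => (fcat ci.1 == cat)) := by
    intro cat; funext ci; rw [lookup_eq_fcat]
  simp [categorize_commands_alt, categoryNamesB, hfun]
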